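-- pv_equiv track=rewrite | github.com/Mahdiar-Khodabakhshi/PyOOAD | labs/lab2/procedural_abstraction.py | reverse_factorial
-- ===== SOURCE A (Python) =====
-- def reverse_factorial(x: int) -> int:
--     """
--     For a positive integer x, this method returns the smallest positive integer n
--     for which n! is greater than or equal to x. If x is not positive, it returns 1.
--
--     """
--     hold = x
--     divider = 1
--
--     if x > 0:
--         # Loop until the integer division result drops to 1 or below.
--         while hold > 1:
--             hold = hold // divider
--             divider += 1
--         answer = divider - 1
--     else:
--         answer = 1
--
--     return answer
-- ===== SOURCE B (Python) =====
-- def reverse_factorial(x: int) -> int: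
--     """
--     For a positive integer x, returns the number of integers m >= 0 with
--     2 * m! <= x (which is what the original's chained floor divisions compute);
--     returns 1 if x is not positive.
--     """
--     if x <= 0:
--         return 1
--     count = 0
--     fact = 1  # 0! ; invariant: fact == count!
--     while 2 * fact <= x:
--         count += 1
--         fact *= count
--     return count
-- ===== Notes on version B (the rewrite author's own statement) =====
-- stated objective: alternative
-- what changed: Instead of repeatedly floor-dividing a running copy of x by an increasing divisor, B builds the factorial up explicitly and counts how many m >= 0 satisfy 2*m! <= x, which equals A's iteration count.
import Mathlib
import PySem

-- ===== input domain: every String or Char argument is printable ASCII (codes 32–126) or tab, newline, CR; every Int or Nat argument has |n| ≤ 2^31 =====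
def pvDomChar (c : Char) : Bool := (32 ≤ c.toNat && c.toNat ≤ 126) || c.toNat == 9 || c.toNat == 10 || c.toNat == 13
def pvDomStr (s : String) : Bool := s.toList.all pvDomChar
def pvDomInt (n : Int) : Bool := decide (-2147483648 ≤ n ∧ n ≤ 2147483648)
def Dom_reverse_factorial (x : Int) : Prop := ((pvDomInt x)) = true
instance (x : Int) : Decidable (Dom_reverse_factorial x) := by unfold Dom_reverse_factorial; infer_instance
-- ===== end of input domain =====

-- B replaces A's chained floor divisions of a running value by an explicit factorial
-- built upward with a counter (objective: alternative decomposition, same cost).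

-- ===== PORT A =====
-- the `while hold > 1` loop: state (hold, divider)
def pvLoopA (hold divider : Int) : Int :=
  if 1 < hold then pvLoopA (PySem.Int.floordiv hold divider) (divider + 1) else divider
termination_by 2 * hold.toNat + (if divider ≤ 1 then 1 else 0)
decreasing_by
  simp only [PySem.Int.floordiv]
  rcases lt_trichotomy divider 1 with hd | hd | hd
  · have h0 : hold.fdiv divider ≤ 0 :=
      Int.fdiv_nonpos_of_nonneg_of_nonpos (by omega) (by omega)
    split_ifs <;> omega
  · subst hd; simp [Int.fdiv_one]
  · have h2 : hold.fdiv divider = hold / divider := Int.fdiv_eq_ediv_of_nonneg hold (by omega)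
    have h4 : hold / divider < hold := by
      rw [Int.ediv_lt_iff_lt_mul (by omega)]; nlinarith
    split_ifs <;> omega

def reverse_factorial (x : Int) : Int :=
  if 0 < x then pvLoopA x 1 - 1 else 1

-- ===== PORT B =====
-- the `while 2*fact <= x` loop of Source B; fuel only makes the recursion total
-- (x.toNat + 1 iterations always suffice — see pvCnt_le below)
def pvLoopB (fuel : Nat) (x count fact : Int) : Int :=
  match fuel with
  | 0 => count
  | f + 1 => if 2 * fact ≤ x then pvLoopB f x (count + 1) (fact * (count + 1)) else count

def reverse_factorial_alt (x : Int) : Int :=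
  if x ≤ 0 then 1 else pvLoopB (x.toNat + 1) x 0 1

-- ===== PRECONDITION & SPEC =====
def Spec_reverse_factorial (x : Int) (out : Int) : Prop := out = reverse_factorial_alt x
instance (x : Int) (out : Int) : Decidable (Spec_reverse_factorial x out) := by unfold Spec_reverse_factorial; infer_instance

-- ===== CLAIM (what is proved, stated in full; the proofs are below) =====
def Claim_equal_reverse_factorial : Prop := ∀ (x : Int), Dom_reverse_factorial x → Spec_reverse_factorial x (reverse_factorial x)

-- ===== LEMMAS AND PROOFS =====

-- proof-side counter: number of m ≥ n with 2 * m! ≤ x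
def pvCnt (x n : Nat) : Nat :=
  if 2 * n.factorial ≤ x then pvCnt x (n + 1) + 1 else 0
termination_by x - n
decreasing_by
  have h1 : n ≤ n.factorial := Nat.self_le_factorial n
  have h2 : 0 < n.factorial := Nat.factorial_pos n
  omega

lemma pvCnt_le (x n : Nat) : pvCnt x n ≤ x - n := by
  fun_induction pvCnt x n with
  | case1 n h ih =>
    have h1 : n ≤ n.factorial := Nat.self_le_factorial n
    have h2 : 0 < n.factorial := Nat.factorial_pos n
    omega
  | case2 n h => omega

lemma loopA_eq (x n : Nat) :
    pvLoopA ((x / n.factorial : Nat) : Int) ((n : Int) + 1) = (n : Int) + 1 + pvCnt x n := by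
  fun_induction pvCnt x n with
  | case1 n h ih =>
    have hpos : 0 < n.factorial := Nat.factorial_pos n
    have hdiv : 2 ≤ x / n.factorial := (Nat.le_div_iff_mul_le hpos).mpr (by omega)
    rw [pvLoopA, if_pos (by exact_mod_cast (by omega : (1:Nat) < x / n.factorial))]
    have hcast : PySem.Int.floordiv ((x / n.factorial : Nat) : Int) ((n : Int) + 1)
        = (((x / n.factorial) / (n + 1) : Nat) : Int) := by
      have := PySem.Int.floordiv_natCast (x / n.factorial) (n + 1)
      push_cast at this ⊢
      exact this
    rw [hcast]
    have hfac : x / n.factorial / (n + 1) = x / (n + 1).factorial := by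
      rw [Nat.div_div_eq_div_mul, Nat.factorial_succ, Nat.mul_comm]
    rw [hfac]
    have := ih
    push_cast at this ⊢
    linarith [this]
  | case2 n h =>
    have hpos : 0 < n.factorial := Nat.factorial_pos n
    have hdiv : x / n.factorial < 2 := by
      rcases Nat.lt_or_ge (x / n.factorial) 2 with h' | h'
      · exact h'
      · exact absurd ((Nat.le_div_iff_mul_le hpos).mp h') (by omega)
    rw [pvLoopA, if_neg (by exact_mod_cast (by omega : ¬ (1:Nat) < x / n.factorial))]
    simp

lemma loopB_eq (fuel : Nat) : ∀ (x n : Nat), pvCnt x n ≤ fuel →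
    pvLoopB fuel (x : Int) (n : Int) ((n.factorial : Nat) : Int) = (n : Int) + pvCnt x n := by
  induction fuel with
  | zero =>
    intro x n hle
    have h0 : pvCnt x n = 0 := Nat.le_zero.mp hle
    simp [pvLoopB, h0]
  | succ f ih =>
    intro x n hle
    rw [pvLoopB]
    by_cases h : 2 * n.factorial ≤ x
    · rw [if_pos (by exact_mod_cast h)]
      have hstep : pvCnt x n = pvCnt x (n + 1) + 1 := by rw [pvCnt, if_pos h]
      have hle' : pvCnt x (n + 1) ≤ f := by omega
      have hfac : ((n.factorial : Nat) : Int) * ((n : Int) + 1) = (((n + 1).factorial : Nat) : Int) := by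
        rw [Nat.factorial_succ]; push_cast; ring
      have := ih x (n + 1) hle'
      rw [hfac]
      push_cast at this ⊢
      rw [this, hstep]
      push_cast
      ring
    · rw [if_neg (by exact_mod_cast h)]
      have hstep : pvCnt x n = 0 := by rw [pvCnt, if_neg h]
      simp [hstep]

-- ===== VERDICT (by name: the statement is the Claim_ definition above) =====
theorem reverse_factorial_spec : Claim_equal_reverse_factorial := by
  intro x _
  unfold Spec_reverse_factorial reverse_factorial reverse_factorial_alt
  by_cases hx : 0 < x
  · rw [if_pos hx, if_neg (by omega)]
    obtain ⟨m, rfl⟩ : ∃ m : Nat, x = (m : Int) := ⟨x.toNat, (Int.toNat_of_nonneg (by omega)).symm⟩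
    have hm : 1 ≤ m := by exact_mod_cast hx
    have hB : pvLoopB (((m : Int)).toNat + 1) (m : Int) 0 1 = (pvCnt m 0 : Int) := by
      have hfuel : pvCnt m 0 ≤ ((m : Int)).toNat + 1 := by
        have := pvCnt_le m 0
        omega
      have := loopB_eq (((m : Int)).toNat + 1) m 0 hfuel
      simpa using this
    rw [hB]
    by_cases hm1 : m = 1
    · subst hm1
      rw [pvLoopA, if_neg (by norm_num)]
      rw [pvCnt, if_neg (by simp [Nat.factorial])]
      norm_num
    · have hm2 : 2 ≤ m := by omega
      rw [pvLoopA, if_pos (by exact_mod_cast hm2)]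
      have h1 : PySem.Int.floordiv (m : Int) 1 = ((m / Nat.factorial 1 : Nat) : Int) := by
        simp [PySem.Int.floordiv, Int.fdiv_one, Nat.factorial]
      rw [h1]
      have h2 := loopA_eq m 1
      have hc0 : pvCnt m 0 = pvCnt m 1 + 1 := by
        rw [pvCnt, if_pos (by simp [Nat.factorial]; omega)]
      rw [hc0]
      push_cast at h2 ⊢
      omega
  · rw [if_neg hx, if_pos (by omega)]
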